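-- pv_equiv track=rewrite | github.com/JosephOcasio/beyond-seo | aura-governance-hub/tools/ncep.py | reachable
-- ===== SOURCE A (Python) =====
-- from collections import defaultdict, deque
-- from typing import Dict, Iterable, List, Optional, Sequence, Set, Tuple
--
-- def reachable(g: Dict[str, List[str]], start: str, goal: str, skip_edge: Optional[Tuple[str, str]] = None) -> bool:
--     if start == goal:
--         return True
--     q = deque([start])
--     seen = {start}
--     while q:
--         cur = q.popleft()
--         for nxt in g.get(cur, []):
--             if skip_edge and (cur, nxt) == skip_edge:
--                 continue
--             if nxt == goal:
--                 return True
--             if nxt in seen: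
--                 continue
--             seen.add(nxt)
--             q.append(nxt)
--     return False
-- ===== SOURCE B (Python) =====
-- def reachable(g, start, goal, skip_edge=None):
--     # Round-based fixed-point saturation instead of a queue-driven BFS:
--     # repeatedly add all allowed successors of the current reachable set
--     # until nothing new appears, then answer by membership.
--     if start == goal:
--         return True
--     seen = {start}
--     while True:
--         frontier = {v for u in seen for v in g.get(u, [])
--                     if not (skip_edge and (u, v) == skip_edge) and v not in seen}
--         if not frontier:
--             return goal in seen
--         seen |= frontier
-- ===== Notes on version B (the rewrite author's own statement) =====
-- stated objective: alternative
-- what changed: Replaced the queue-driven BFS with early goal-return by a round-based fixed-point saturation: repeatedly union all allowed successors of the reachable set until stable, then test goal membership.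
import Mathlib
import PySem

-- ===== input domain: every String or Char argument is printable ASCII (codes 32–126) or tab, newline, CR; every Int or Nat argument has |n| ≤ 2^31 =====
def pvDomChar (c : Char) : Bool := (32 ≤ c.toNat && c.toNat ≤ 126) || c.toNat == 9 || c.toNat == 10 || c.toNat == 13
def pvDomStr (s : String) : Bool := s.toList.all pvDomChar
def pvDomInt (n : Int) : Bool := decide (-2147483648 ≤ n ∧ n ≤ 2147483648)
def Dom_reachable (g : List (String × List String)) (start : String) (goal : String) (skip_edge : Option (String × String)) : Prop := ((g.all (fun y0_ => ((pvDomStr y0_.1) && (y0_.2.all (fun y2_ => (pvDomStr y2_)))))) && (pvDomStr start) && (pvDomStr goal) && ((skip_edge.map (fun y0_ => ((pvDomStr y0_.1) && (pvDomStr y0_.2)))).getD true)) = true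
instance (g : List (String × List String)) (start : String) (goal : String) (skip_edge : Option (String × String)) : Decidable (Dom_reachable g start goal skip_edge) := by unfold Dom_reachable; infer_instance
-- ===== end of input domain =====

-- B replaces A's queue-driven BFS with early goal-return by a round-based
-- fixed-point saturation of the reachable set (objective: alternative).

-- ===== PORT A =====
-- g.get(cur, [])  (dict lookup with default, first match)
def pvAdj (g : List (String × List String)) (u : String) : List String :=
  (PySem.Dict.mk g).getD u []

-- 'skip_edge and (cur, nxt) == skip_edge' — a present tuple is always truthy
def pvAllowed (skip_edge : Option (String × String)) (u v : String) : Bool :=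
  match skip_edge with
  | none => true
  | some e => !((u, v) == e)

-- the inner 'for nxt in g.get(cur, [])' loop; none = 'return True'
def pvInner (goal : String) (skip_edge : Option (String × String)) (cur : String) :
    List String → List String → PySem.Set String → Option (List String × PySem.Set String)
  | [], q, seen => some (q, seen)
  | nxt :: rest, q, seen =>
    if !(pvAllowed skip_edge cur nxt) then pvInner goal skip_edge cur rest q seen
    else if nxt == goal then none
    else if PySem.Set.contains seen nxt then pvInner goal skip_edge cur rest q seen
    else pvInner goal skip_edge cur rest (q ++ [nxt]) (PySem.Set.add seen nxt)

-- fuel bound: the while loop pops at most (total adjacency size + 1) times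
def pvFuel (g : List (String × List String)) : Nat := (g.flatMap Prod.snd).length + 2

-- the 'while q:' loop
def pvBfs (g : List (String × List String)) (goal : String)
    (skip_edge : Option (String × String)) :
    Nat → List String → PySem.Set String → Bool
  | 0, _, _ => false
  | _ + 1, [], _ => false
  | fuel + 1, cur :: q, seen =>
    match pvInner goal skip_edge cur (pvAdj g cur) q seen with
    | none => true
    | some (q2, seen2) => pvBfs g goal skip_edge fuel q2 seen2

def reachable (g : List (String × List String)) (start : String) (goal : String) (skip_edge : Option (String × String)) : Bool :=
  if start == goal then true
  else pvBfs g goal skip_edge (pvFuel g) [start] (PySem.Set.ofList [start])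

-- ===== PORT B =====
-- the frontier set comprehension (order-insensitive: only emptiness/membership used)
def pvFrontier (g : List (String × List String)) (skip_edge : Option (String × String))
    (seen : PySem.Set String) : List String :=
  seen.flatMap (fun u =>
    (pvAdj g u).filter (fun v => pvAllowed skip_edge u v && !(PySem.Set.contains seen v)))

-- the 'while True:' saturation loop
def pvSat (g : List (String × List String)) (goal : String)
    (skip_edge : Option (String × String)) :
    Nat → PySem.Set String → Bool
  | 0, _ => false
  | fuel + 1, seen =>
    let fr := pvFrontier g skip_edge seen
    if fr.isEmpty then PySem.Set.contains seen goal
    else pvSat g goal skip_edge fuel (PySem.Set.update seen fr)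

def reachable_alt (g : List (String × List String)) (start : String) (goal : String) (skip_edge : Option (String × String)) : Bool :=
  if start == goal then true
  else pvSat g goal skip_edge (pvFuel g) (PySem.Set.ofList [start])

-- ===== PRECONDITION & SPEC =====
def Spec_reachable (g : List (String × List String)) (start : String) (goal : String) (skip_edge : Option (String × String)) (out : Bool) : Prop := out = reachable_alt g start goal skip_edge
instance (g : List (String × List String)) (start : String) (goal : String) (skip_edge : Option (String × String)) (out : Bool) : Decidable (Spec_reachable g start goal skip_edge out) := by unfold Spec_reachable; infer_instance

-- ===== CLAIM (what is proved, stated in full; the proofs are below) =====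
def Claim_equal_reachable : Prop := ∀ (g : List (String × List String)) (start : String) (goal : String) (skip_edge : Option (String × String)), Dom_reachable g start goal skip_edge → Spec_reachable g start goal skip_edge (reachable g start goal skip_edge)

-- ===== LEMMAS AND PROOFS =====

-- the allowed-edge relation both searches explore
def pvEdge (g : List (String × List String)) (skip_edge : Option (String × String))
    (u v : String) : Prop :=
  v ∈ pvAdj g u ∧ pvAllowed skip_edge u v = true

theorem nodup_length_le {l₁ l₂ : List String} (h : l₁.Nodup) (hs : ∀ x ∈ l₁, x ∈ l₂) :
    l₁.length ≤ l₂.length := by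
  calc l₁.length = l₁.toFinset.card := (List.toFinset_card_of_nodup h).symm
    _ ≤ l₂.toFinset.card := Finset.card_le_card (fun x hx => by
        simp only [List.mem_toFinset] at *; exact hs x hx)
    _ ≤ l₂.length := l₂.toFinset_card_le

theorem pvAdj_subset (g : List (String × List String)) (u : String) :
    ∀ v ∈ pvAdj g u, v ∈ g.flatMap Prod.snd := by
  unfold pvAdj
  induction g with
  | nil => intro v hv; simp [PySem.Dict.getD, PySem.Dict.get?] at hv
  | cons p rest ih =>
    obtain ⟨k, vs⟩ := p
    intro v hv
    rw [PySem.Dict.getD, PySem.Dict.get?_mk_cons] at hv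
    by_cases h : (k == u) = true
    · rw [if_pos h] at hv
      simp only [Option.getD_some] at hv
      exact List.mem_flatMap.mpr ⟨(k, vs), List.mem_cons_self, hv⟩
    · rw [if_neg h] at hv
      rcases List.mem_flatMap.mp (ih v hv) with ⟨q, hq, hvq⟩
      exact List.mem_flatMap.mpr ⟨q, List.mem_cons_of_mem _ hq, hvq⟩

theorem rtg_mem (g : List (String × List String)) (sk : Option (String × String))
    (seen : List String)
    (closed : ∀ x ∈ seen, ∀ y, pvEdge g sk x y → y ∈ seen)
    {x y : String} (h : Relation.ReflTransGen (pvEdge g sk) x y)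
    (hx : x ∈ seen) : y ∈ seen := by
  induction h with
  | refl => exact hx
  | tail _ hstep ih => exact closed _ ih _ hstep

theorem pvInner_none_iff (goal : String) (sk : Option (String × String)) (cur : String) :
    ∀ (ns q : List String) (seen : PySem.Set String),
      pvInner goal sk cur ns q seen = none ↔
        ∃ y ∈ ns, pvAllowed sk cur y = true ∧ y = goal := by
  intro ns
  induction ns with
  | nil => intro q seen; simp [pvInner]
  | cons nxt rest ih =>
    intro q seen
    simp only [pvInner]
    split_ifs with h1 h2 h3
    · have ha : pvAllowed sk cur nxt = false := by simpa using h1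
      rw [ih]
      constructor
      · rintro ⟨y, hy, hh⟩; exact ⟨y, List.mem_cons_of_mem _ hy, hh⟩
      · rintro ⟨y, hy, hh⟩
        rcases List.mem_cons.mp hy with rfl | hy'
        · rw [hh.1] at ha; cases ha
        · exact ⟨y, hy', hh⟩
    · have ha : pvAllowed sk cur nxt = true := by simpa using h1
      simp only [true_iff]
      exact ⟨nxt, List.mem_cons_self, ha, by simpa using h2⟩
    · have hng : nxt ≠ goal := fun e => h2 (by simp [e])
      rw [ih]
      constructor
      · rintro ⟨y, hy, hh⟩; exact ⟨y, List.mem_cons_of_mem _ hy, hh⟩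
      · rintro ⟨y, hy, hh⟩
        rcases List.mem_cons.mp hy with rfl | hy'
        · exact absurd hh.2 hng
        · exact ⟨y, hy', hh⟩
    · have hng : nxt ≠ goal := fun e => h2 (by simp [e])
      rw [ih]
      constructor
      · rintro ⟨y, hy, hh⟩; exact ⟨y, List.mem_cons_of_mem _ hy, hh⟩
      · rintro ⟨y, hy, hh⟩
        rcases List.mem_cons.mp hy with rfl | hy'
        · exact absurd hh.2 hng
        · exact ⟨y, hy', hh⟩

theorem pvInner_some_spec (goal : String) (sk : Option (String × String)) (cur : String) :
    ∀ (ns q : List String) (seen : PySem.Set String), seen.Nodup →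
      ∀ q2 seen2, pvInner goal sk cur ns q seen = some (q2, seen2) →
        ∃ Δ : List String,
          q2 = q ++ Δ ∧ (seen2 : List String) = seen ++ Δ ∧ Δ.Nodup ∧
          (∀ y ∈ Δ, y ∈ ns ∧ pvAllowed sk cur y = true ∧ y ≠ goal ∧ y ∉ seen) ∧
          (∀ y ∈ ns, pvAllowed sk cur y = true → y ≠ goal) ∧
          (∀ y ∈ ns, pvAllowed sk cur y = true → y ∈ seen ++ Δ) := by
  intro ns
  induction ns with
  | nil =>
    intro q seen hnd q2 seen2 h
    simp only [pvInner, Option.some.injEq, Prod.mk.injEq] at h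
    obtain ⟨hq, hs⟩ := h
    exact ⟨[], by simp [hq.symm], by simp [hs.symm], List.nodup_nil,
      by simp, by simp, by simp⟩
  | cons nxt rest ih =>
    intro q seen hnd q2 seen2 h
    simp only [pvInner] at h
    split_ifs at h with h1 h2 h3
    · -- edge skipped: not allowed
      have ha : pvAllowed sk cur nxt = false := by simpa using h1
      obtain ⟨Δ, hq, hs, hnd', hmem, hng, hcov⟩ := ih q seen hnd q2 seen2 h
      refine ⟨Δ, hq, hs, hnd', ?_, ?_, ?_⟩
      · intro y hy; obtain ⟨a, b, c, d⟩ := hmem y hy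
        exact ⟨List.mem_cons_of_mem _ a, b, c, d⟩
      · intro y hy hay
        rcases List.mem_cons.mp hy with rfl | hy'
        · rw [hay] at ha; cases ha
        · exact hng y hy' hay
      · intro y hy hay
        rcases List.mem_cons.mp hy with rfl | hy'
        · rw [hay] at ha; cases ha
        · exact hcov y hy' hay
    · -- neighbour already seen
      have hmemseen : nxt ∈ seen := (PySem.Set.contains_iff _ _).mp h3
      have hga : nxt ≠ goal := fun e => h2 (by simp [e])
      obtain ⟨Δ, hq, hs, hnd', hmem, hng, hcov⟩ := ih q seen hnd q2 seen2 h
      refine ⟨Δ, hq, hs, hnd', ?_, ?_, ?_⟩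
      · intro y hy; obtain ⟨a, b, c, d⟩ := hmem y hy
        exact ⟨List.mem_cons_of_mem _ a, b, c, d⟩
      · intro y hy hay
        rcases List.mem_cons.mp hy with rfl | hy'
        · exact hga
        · exact hng y hy' hay
      · intro y hy hay
        rcases List.mem_cons.mp hy with rfl | hy'
        · exact List.mem_append_left _ hmemseen
        · exact hcov y hy' hay
    · -- fresh neighbour enqueued
      have hnot : nxt ∉ seen := fun hm => h3 ((PySem.Set.contains_iff _ _).mpr hm)
      have hga : nxt ≠ goal := fun e => h2 (by simp [e])
      have hallowed : pvAllowed sk cur nxt = true := by simpa using h1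
      rw [PySem.Set.add_of_not_mem hnot] at h
      have hnd2 : (seen ++ [nxt]).Nodup := by
        rw [List.nodup_append]
        exact ⟨hnd, List.nodup_singleton _,
          fun a ha b hb e => by subst e; rw [List.mem_singleton] at hb; subst hb; exact hnot ha⟩
      obtain ⟨Δ, hq, hs, hnd', hmem, hng, hcov⟩ := ih (q ++ [nxt]) (seen ++ [nxt]) hnd2 q2 seen2 h
      have hassoc : ∀ l : List String, (l ++ [nxt]) ++ Δ = l ++ nxt :: Δ := by
        intro l; simp
      refine ⟨nxt :: Δ, ?_, ?_, ?_, ?_, ?_, ?_⟩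
      · rw [hq, hassoc]
      · rw [hs, hassoc]
      · rw [List.nodup_cons]
        exact ⟨fun hin => (hmem nxt hin).2.2.2 (List.mem_append_right _ (List.mem_singleton.mpr rfl)), hnd'⟩
      · intro y hy
        rcases List.mem_cons.mp hy with rfl | hy'
        · exact ⟨List.mem_cons_self, hallowed, hga, hnot⟩
        · obtain ⟨a, b, c, d⟩ := hmem y hy'
          exact ⟨List.mem_cons_of_mem _ a, b, c,
            fun hm => d (List.mem_append_left _ hm)⟩
      · intro y hy hay
        rcases List.mem_cons.mp hy with rfl | hy'
        · exact hga
        · exact hng y hy' hay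
      · intro y hy hay
        rcases List.mem_cons.mp hy with rfl | hy'
        · exact List.mem_append_right _ List.mem_cons_self
        · rw [← hassoc seen]
          exact hcov y hy' hay

-- BFS loop characterisation
theorem pvBfs_iff (g : List (String × List String)) (goal : String)
    (sk : Option (String × String)) (U : List String)
    (hWU : ∀ x ∈ g.flatMap Prod.snd, x ∈ U) :
    ∀ (fuel : Nat) (q : List String) (seen : PySem.Set String),
      seen.Nodup → (∀ x ∈ seen, x ∈ U) → q.Nodup → (∀ x ∈ q, x ∈ seen) →
      goal ∉ seen →
      (∀ x ∈ seen, x ∉ q → ∀ y, pvEdge g sk x y → y ∈ seen) →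
      U.length - seen.length + q.length + 1 ≤ fuel →
      (pvBfs g goal sk fuel q seen = true ↔
        ∃ x ∈ seen, Relation.ReflTransGen (pvEdge g sk) x goal) := by
  intro fuel
  induction fuel with
  | zero =>
    intro q seen _ _ _ _ _ _ hfuel
    omega
  | succ fuel ih =>
    intro q seen hnd hsU hqnd hqs hg hcl hfuel
    match q with
    | [] =>
      simp only [pvBfs]
      constructor
      · intro h; cases h
      · rintro ⟨x, hx, hr⟩
        exact ((hg (rtg_mem g sk seen (fun a ha y hy => hcl a ha (by simp) y hy) hr hx)).elim)
    | cur :: q' =>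
      have hcur : cur ∈ seen := hqs cur List.mem_cons_self
      cases hi : pvInner goal sk cur (pvAdj g cur) q' seen with
      | none =>
        obtain ⟨y, hy, hay, rfl⟩ := (pvInner_none_iff goal sk cur _ q' seen).mp hi
        simp only [pvBfs, hi, true_iff]
        exact ⟨cur, hcur, Relation.ReflTransGen.single ⟨hy, hay⟩⟩
      | some p =>
        obtain ⟨q2, seen2⟩ := p
        obtain ⟨Δ, hq2, hs2, hΔnd, hmem, hng, hcov⟩ :=
          pvInner_some_spec goal sk cur _ q' seen hnd q2 seen2 hi
        simp only [pvBfs, hi]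
        have hq'nd : q'.Nodup := (List.nodup_cons.mp hqnd).2
        have hcurq' : cur ∉ q' := (List.nodup_cons.mp hqnd).1
        have hnd2 : seen2.Nodup := by
          rw [hs2, List.nodup_append]
          exact ⟨hnd, hΔnd, fun a ha b hb e => (hmem b hb).2.2.2 (e ▸ ha)⟩
        have hsU2 : ∀ x ∈ seen2, x ∈ U := by
          intro x hx
          rw [hs2, List.mem_append] at hx
          rcases hx with hx | hx
          · exact hsU x hx
          · exact hWU x (pvAdj_subset g cur x (hmem x hx).1)
        have hqnd2 : q2.Nodup := by
          rw [hq2, List.nodup_append]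
          exact ⟨hq'nd, hΔnd,
            fun a ha b hb e => (hmem b hb).2.2.2 (e ▸ hqs a (List.mem_cons_of_mem _ ha))⟩
        have hqs2 : ∀ x ∈ q2, x ∈ seen2 := by
          intro x hx
          rw [hq2, List.mem_append] at hx
          rw [hs2, List.mem_append]
          rcases hx with hx | hx
          · exact Or.inl (hqs x (List.mem_cons_of_mem _ hx))
          · exact Or.inr hx
        have hg2 : goal ∉ seen2 := by
          rw [hs2, List.mem_append]
          rintro (hx | hx)
          · exact hg hx
          · exact (hmem goal hx).2.2.1 rfl
        have hcl2 : ∀ x ∈ seen2, x ∉ q2 → ∀ y, pvEdge g sk x y → y ∈ seen2 := by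
          intro x hx hnx y hy
          rw [hs2, List.mem_append] at hx
          rw [hq2] at hnx
          have hnq' : x ∉ q' := fun hm => hnx (List.mem_append_left _ hm)
          have hnΔ : x ∉ Δ := fun hm => hnx (List.mem_append_right _ hm)
          rcases hx with hx | hx
          · by_cases hxc : x = cur
            · subst hxc
              rw [hs2]
              exact hcov y hy.1 hy.2
            · have hnq : x ∉ cur :: q' := by
                intro hm
                rcases List.mem_cons.mp hm with e | hm'
                · exact hxc e
                · exact hnq' hm'
              rw [hs2]
              exact List.mem_append_left _ (hcl x hx hnq y hy)
          · exact absurd hx hnΔ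
        have hlen2 : seen2.length = seen.length + Δ.length := by
          rw [hs2, List.length_append]
        have hqlen2 : q2.length = q'.length + Δ.length := by
          rw [hq2, List.length_append]
        have hle : seen2.length ≤ U.length := nodup_length_le hnd2 hsU2
        rw [ih q2 seen2 hnd2 hsU2 hqnd2 hqs2 hg2 hcl2 (by
          simp only [List.length_cons] at hfuel
          omega)]
        constructor
        · rintro ⟨x, hx, hr⟩
          rw [hs2, List.mem_append] at hx
          rcases hx with hx | hx
          · exact ⟨x, hx, hr⟩
          · exact ⟨cur, hcur,
              Relation.ReflTransGen.head ⟨(hmem x hx).1, (hmem x hx).2.1⟩ hr⟩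
        · rintro ⟨x, hx, hr⟩
          exact ⟨x, by rw [hs2]; exact List.mem_append_left _ hx, hr⟩

-- frontier characterisation
theorem pvFrontier_mem (g : List (String × List String)) (sk : Option (String × String))
    (seen : PySem.Set String) (v : String) :
    v ∈ pvFrontier g sk seen ↔ (∃ u ∈ seen, pvEdge g sk u v) ∧ v ∉ seen := by
  unfold pvFrontier
  rw [List.mem_flatMap]
  constructor
  · rintro ⟨u, hu, hv⟩
    rw [List.mem_filter] at hv
    obtain ⟨hadj, hcond⟩ := hv
    rw [Bool.and_eq_true, Bool.not_eq_true', ← Bool.not_eq_true] at hcond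
    exact ⟨⟨u, hu, hadj, hcond.1⟩, fun hm => hcond.2 ((PySem.Set.contains_iff _ _).mpr hm)⟩
  · rintro ⟨⟨u, hu, hadj, hall⟩, hnm⟩
    refine ⟨u, hu, List.mem_filter.mpr ⟨hadj, ?_⟩⟩
    rw [Bool.and_eq_true, Bool.not_eq_true', ← Bool.not_eq_true]
    exact ⟨hall, fun hc => hnm ((PySem.Set.contains_iff _ _).mp hc)⟩

-- saturation loop characterisation
theorem pvSat_iff (g : List (String × List String)) (goal : String)
    (sk : Option (String × String)) (U : List String)
    (hWU : ∀ x ∈ g.flatMap Prod.snd, x ∈ U) :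
    ∀ (fuel : Nat) (seen : PySem.Set String),
      seen.Nodup → (∀ x ∈ seen, x ∈ U) →
      U.length + 1 - seen.length ≤ fuel →
      (pvSat g goal sk fuel seen = true ↔
        ∃ x ∈ seen, Relation.ReflTransGen (pvEdge g sk) x goal) := by
  intro fuel
  induction fuel with
  | zero =>
    intro seen hnd hsU hfuel
    have := nodup_length_le hnd hsU
    omega
  | succ fuel ih =>
    intro seen hnd hsU hfuel
    simp only [pvSat]
    by_cases he : (pvFrontier g sk seen).isEmpty
    · rw [if_pos he]
      have hclosed : ∀ x ∈ seen, ∀ y, pvEdge g sk x y → y ∈ seen := by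
        intro x hx y hy
        by_contra hny
        have hyf : y ∈ pvFrontier g sk seen :=
          (pvFrontier_mem g sk seen y).mpr ⟨⟨x, hx, hy⟩, hny⟩
        rw [List.isEmpty_iff] at he
        rw [he] at hyf
        cases hyf
      constructor
      · intro hc
        exact ⟨goal, (PySem.Set.contains_iff _ _).mp hc, Relation.ReflTransGen.refl⟩
      · rintro ⟨x, hx, hr⟩
        exact (PySem.Set.contains_iff _ _).mpr (rtg_mem g sk seen hclosed hr hx)
    · rw [if_neg he]
      have hnd2 : (seen.update (pvFrontier g sk seen)).Nodup :=
        PySem.Set.nodup_update seen _ hnd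
      have hmem2 : ∀ x, x ∈ seen.update (pvFrontier g sk seen) ↔
          x ∈ seen ∨ x ∈ pvFrontier g sk seen :=
        fun x => PySem.Set.mem_update seen _ x
      have hU2 : ∀ x ∈ seen.update (pvFrontier g sk seen), x ∈ U := by
        intro x hx
        rcases (hmem2 x).mp hx with h | h
        · exact hsU x h
        · obtain ⟨⟨u, _, hadj, _⟩, _⟩ := (pvFrontier_mem g sk seen x).mp h
          exact hWU x (pvAdj_subset g u x hadj)
      have hgrow : seen.length + 1 ≤ (seen.update (pvFrontier g sk seen)).length := by
        rw [PySem.Set.update_eq_append_filter, List.length_append]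
        obtain ⟨v0, hv0⟩ := List.exists_mem_of_ne_nil (pvFrontier g sk seen)
          (fun hnil => he (by simp [hnil]))
        have hv0n : v0 ∉ seen := ((pvFrontier_mem g sk seen v0).mp hv0).2
        have hv0f : v0 ∈ (PySem.Set.ofList (pvFrontier g sk seen)).filter
            (fun y => !seen.contains y) := by
          rw [List.mem_filter]
          refine ⟨(PySem.Set.mem_ofList _ _).mpr hv0, ?_⟩
          rw [Bool.not_eq_eq_eq_not, Bool.not_true, ← Bool.not_eq_true]
          exact fun hc => hv0n ((PySem.Set.contains_iff _ _).mp hc)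
        have := List.length_pos_of_mem hv0f
        omega
      have hle2 : (seen.update (pvFrontier g sk seen)).length ≤ U.length :=
        nodup_length_le hnd2 hU2
      rw [ih (seen.update (pvFrontier g sk seen)) hnd2 hU2 (by omega)]
      constructor
      · rintro ⟨x, hx, hr⟩
        rcases (hmem2 x).mp hx with h | h
        · exact ⟨x, h, hr⟩
        · obtain ⟨⟨u, hu, hedge⟩, _⟩ := (pvFrontier_mem g sk seen x).mp h
          exact ⟨u, hu, Relation.ReflTransGen.head hedge hr⟩
      · rintro ⟨x, hx, hr⟩
        exact ⟨x, (hmem2 x).mpr (Or.inl hx), hr⟩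

-- ===== VERDICT (by name: the statement is the Claim_ definition above) =====
theorem reachable_spec : Claim_equal_reachable := by
  intro g start goal sk _
  unfold Spec_reachable reachable reachable_alt
  by_cases h : start == goal
  · simp [h]
  · have hne : start ≠ goal := by simpa using h
    simp only [h, Bool.false_eq_true, if_false]
    have hWU : ∀ x ∈ g.flatMap Prod.snd, x ∈ start :: g.flatMap Prod.snd := by
      intro x hx; exact List.mem_cons_of_mem _ hx
    have hseen : (PySem.Set.ofList [start] : List String) = [start] := rfl
    have hA := pvBfs_iff g goal sk (start :: g.flatMap Prod.snd) hWU (pvFuel g)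
      [start] (PySem.Set.ofList [start])
      (by simp [hseen]) (by simp [hseen]) (by simp) (by simp [hseen])
      (by simp only [hseen, List.mem_singleton]; exact fun e => hne e.symm)
      (by simp [hseen]) (by simp [hseen, pvFuel])
    have hB := pvSat_iff g goal sk (start :: g.flatMap Prod.snd) hWU (pvFuel g)
      (PySem.Set.ofList [start])
      (by simp [hseen]) (by simp [hseen]) (by simp [hseen, pvFuel])
    exact Bool.coe_iff_coe.mp (hA.trans hB.symm)
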